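-- pv_equiv track=rewrite | github.com/KYUSEONGHAN/Development | 하루에 한개씩 문제 풀기/Python/BOJ/다이나믹_프로그래밍/2631.py | solve
-- ===== SOURCE A (Python) =====
-- def solve(n: int, nums: list) -> int:
--     # dp table 초기화
--     dp = [0] * (n+1)
--     dp[0] = 1
--
--     # dp bottom-up
--     for x in range(1, n):
--         l = [dp[y] for y in range(x) if nums[x] > nums[y]]
--         if not l:
--             dp[x] = 1
--         else:
--             dp[x] = max(l) + 1
--
--     return n - max(dp)
-- ===== SOURCE B (Python) =====
-- def solve(n: int, nums: list) -> int:
--     # Patience-sorting LIS: n minus the length of the tails array (O(n log n)).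
--     tails = []
--     for v in nums[:n]:
--         lo, hi = 0, len(tails)
--         while lo < hi:
--             mid = (lo + hi) // 2
--             if tails[mid] < v:
--                 lo = mid + 1
--             else:
--                 hi = mid
--         if lo == len(tails):
--             tails.append(v)
--         else:
--             tails[lo] = v
--     return n - len(tails)
-- ===== Notes on version B (the rewrite author's own statement) =====
-- stated objective: faster
-- what changed: Replaces the O(n^2) longest-increasing-subsequence DP (for each index, scan all earlier indices for the best smaller predecessor) by patience sorting: one pass that maintains the sorted 'tails' array and places each element with a hand-written binary search; the answer is n minus the number of tails.
-- intended difference: For n = 0, A returns -1 (its dp table starts with dp[0] = 1 although no element exists); B returns 0, the intended number of removals for an empty sequence. — e.g. on solve(0, []): A returns -1, B returns 0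
-- outside the precondition, e.g. on solve(1, []): A returns 0, B returns 1
import Mathlib
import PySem

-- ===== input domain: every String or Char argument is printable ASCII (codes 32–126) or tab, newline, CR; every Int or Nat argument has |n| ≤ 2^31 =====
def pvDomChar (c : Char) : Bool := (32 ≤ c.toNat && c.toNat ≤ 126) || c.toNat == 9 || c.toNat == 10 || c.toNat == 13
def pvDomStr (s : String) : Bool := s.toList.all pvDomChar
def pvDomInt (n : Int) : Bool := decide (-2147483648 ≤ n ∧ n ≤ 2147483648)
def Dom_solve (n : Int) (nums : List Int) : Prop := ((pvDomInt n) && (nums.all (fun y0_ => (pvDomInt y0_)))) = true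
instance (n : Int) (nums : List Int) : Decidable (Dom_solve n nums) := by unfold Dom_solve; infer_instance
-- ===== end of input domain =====

-- B replaces A's quadratic longest-increasing-subsequence DP by patience sorting with a
-- hand-written binary search over the tails array; equivalence of the RETURN values is proved.

-- ===== PORT A =====
-- loop body of 'for x in range(1, n)' (dp[x] = max(dp[y] for y < x with nums[x] > nums[y]) + 1, else 1)
def solveStep (nums : List Int) (dp : List Int) (x : Int) : List Int :=
  let l := (PySem.List.pyRange 0 x 1).filterMap (fun y =>
    if (PySem.List.pyGet? nums y).getD 0 < (PySem.List.pyGet? nums x).getD 0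
    then some ((PySem.List.pyGet? dp y).getD 0) else none)
  dp.set x.toNat (if l.isEmpty then 1 else (PySem.List.max? l (fun y => y)).getD 0 + 1)

def solve (n : Int) (nums : List Int) : Int :=
  -- dp = [0] * (n+1); dp[0] = 1   (index in range inside Pre_)
  let dp0 : List Int := (List.replicate (n + 1).toNat 0).set 0 1
  let dp := (PySem.List.pyRange 1 n 1).foldl (solveStep nums) dp0
  n - (PySem.List.max? dp (fun y => y)).getD 0

-- ===== PORT B =====
-- the hand-written bisect_left while-loop of Source B (tails[mid] is always in range when lo < hi ≤ len)
def bisectLoop (tails : List Int) (v : Int) (lo hi : Nat) : Nat :=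
  if h : lo < hi then
    let mid := (lo + hi) / 2
    if tails.getD mid 0 < v then bisectLoop tails v (mid + 1) hi
    else bisectLoop tails v lo mid
  else lo
termination_by hi - lo
decreasing_by all_goals omega

-- one iteration of B's loop over nums[:n]
def tailsStep (tails : List Int) (v : Int) : List Int :=
  let lo := bisectLoop tails v 0 tails.length
  if lo = tails.length then tails ++ [v] else tails.set lo v

def solve_alt (n : Int) (nums : List Int) : Int :=
  let tails := (PySem.List.slice nums none (some n)).foldl tailsStep []
  n - tails.length

-- ===== PRECONDITION & SPEC =====
-- Pre_ excludes n < 0 and n > len(nums), where A raises IndexError — except the accidental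
-- case n = 1 with nums = [] (the loop body never runs), where A returns 0 and B returns 1.
def Pre_solve (n : Int) (nums : List Int) : Prop := 0 ≤ n ∧ n ≤ (nums.length : Int)
instance (n : Int) (nums : List Int) : Decidable (Pre_solve n nums) := by unfold Pre_solve; infer_instance
def pvWitness_solve : Int × List Int := (2, [1, 2])

-- For n = 0, A returns -1 (its dp table starts with dp[0] = 1 although no element exists);
-- B returns 0, the intended number of removals for an empty sequence.
def D_solve (n : Int) (_nums : List Int) : Prop := n = 0
instance (n : Int) (nums : List Int) : Decidable (D_solve n nums) := by unfold D_solve; infer_instance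

def Spec_solve (n : Int) (nums : List Int) (out : Int) : Prop := ¬ D_solve n nums → out = solve_alt n nums
instance (n : Int) (nums : List Int) (out : Int) : Decidable (Spec_solve n nums out) := by unfold Spec_solve; infer_instance

def pvDiffWitness_solve : Int × List Int := (0, [])
def pvDiffWitnessOut_solve : Int × Int := (-1, 0)

-- ===== CLAIM (what is proved, stated in full; the proofs are below) =====
def Claim_unchanged_solve : Prop := ∀ (n : Int) (nums : List Int), Dom_solve n nums → Pre_solve n nums → Spec_solve n nums (solve n nums)
def Claim_changed_solve : Prop := Dom_solve (pvDiffWitness_solve.1) (pvDiffWitness_solve.2) ∧ Pre_solve (pvDiffWitness_solve.1) (pvDiffWitness_solve.2) ∧ D_solve (pvDiffWitness_solve.1) (pvDiffWitness_solve.2) ∧ solve (pvDiffWitness_solve.1) (pvDiffWitness_solve.2) = pvDiffWitnessOut_solve.1 ∧ solve_alt (pvDiffWitness_solve.1) (pvDiffWitness_solve.2) = pvDiffWitnessOut_solve.2 ∧ pvDiffWitnessOut_solve.1 ≠ pvDiffWitnessOut_solve.2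
def Claim_exact_solve : Prop := ∀ (n : Int) (nums : List Int), Dom_solve n nums → Pre_solve n nums → D_solve n nums → solve n nums ≠ solve_alt n nums

-- ===== LEMMAS AND PROOFS =====

-- ----- model of A: dp values as a list of (value, dp) pairs, built left to right -----

def selList (pairs : List (Int × Int)) (v : Int) : List Int :=
  pairs.filterMap (fun p => if p.1 < v then some p.2 else none)

def selMax (pairs : List (Int × Int)) (v : Int) : Int := (selList pairs v).foldl max 0

def dpsStep (pairs : List (Int × Int)) (v : Int) : List (Int × Int) :=
  pairs ++ [(v, 1 + selMax pairs v)]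

def pairsOf (l : List Int) : List (Int × Int) := l.foldl dpsStep []

def maxsnd (pairs : List (Int × Int)) : Int := (pairs.map Prod.snd).foldl max 0

def tailsOf (l : List Int) : List Int := l.foldl tailsStep []

-- ----- generic max-fold facts -----

theorem foldl_max_eq_or_mem (l : List Int) (a : Int) : l.foldl max a = a ∨ l.foldl max a ∈ l := by
  induction l generalizing a with
  | nil => left; rfl
  | cons x xs ih =>
    rcases ih (max a x) with h | h
    · rcases max_choice a x with hm | hm
      · left; rw [List.foldl_cons, h, hm]
      · right; rw [List.foldl_cons, h, hm]; exact List.mem_cons_self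
    · right; exact List.mem_cons_of_mem _ h

theorem foldl_max_absorb (x : Int) (t : List Int) (hx : 0 ≤ x) :
    (x :: t).foldl max 0 = t.foldl max x := by
  simp [List.foldl_cons, max_eq_right hx]

-- ----- structural facts about pairsOf -----

theorem pairsOf_append (l : List Int) (v : Int) : pairsOf (l ++ [v]) = dpsStep (pairsOf l) v := by
  simp [pairsOf, List.foldl_append]

theorem tailsOf_append (l : List Int) (v : Int) : tailsOf (l ++ [v]) = tailsStep (tailsOf l) v := by
  simp [tailsOf, List.foldl_append]

theorem map_fst_pairsOf (l : List Int) : (pairsOf l).map Prod.fst = l := by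
  induction l using List.reverseRecOn with
  | nil => rfl
  | append_singleton l v ih => rw [pairsOf_append]; simp [dpsStep, ih]

theorem length_pairsOf (l : List Int) : (pairsOf l).length = l.length := by
  have := congrArg List.length (map_fst_pairsOf l)
  simpa using this

theorem snd_pairsOf_pos (l : List Int) : ∀ p ∈ pairsOf l, 1 ≤ p.2 := by
  induction l using List.reverseRecOn with
  | nil => intro p hp; simp [pairsOf] at hp
  | append_singleton l v ih =>
    rw [pairsOf_append]
    intro p hp
    rcases List.mem_append.1 hp with h | h
    · exact ih p h
    · have hv : p = (v, 1 + selMax (pairsOf l) v) := by simpa using h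
      have h0 : (0:Int) ≤ selMax (pairsOf l) v :=
        (PySem.List.le_foldl_max (selList (pairsOf l) v) 0).1
      rw [hv]; simpa using h0

-- ----- bisect loop specification -----

theorem sorted_getD_mono (tails : List Int) (hs : tails.Pairwise (· ≤ ·)) (i j : Nat)
    (hij : i ≤ j) (hj : j < tails.length) : tails.getD i 0 ≤ tails.getD j 0 := by
  rcases Nat.eq_or_lt_of_le hij with h | h
  · subst h; exact le_refl _
  · rw [List.getD_eq_getElem _ _ (lt_trans h hj), List.getD_eq_getElem _ _ hj]
    exact List.pairwise_iff_getElem.1 hs i j _ _ h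

theorem bisectLoop_spec_aux (tails : List Int) (v : Int)
    (hs : tails.Pairwise (· ≤ ·)) :
    ∀ (d lo hi : Nat), hi - lo ≤ d → lo ≤ hi → hi ≤ tails.length →
    (∀ i, i < lo → tails.getD i 0 < v) →
    (∀ i, hi ≤ i → i < tails.length → ¬ tails.getD i 0 < v) →
    bisectLoop tails v lo hi ≤ tails.length ∧
    (∀ i, i < bisectLoop tails v lo hi → tails.getD i 0 < v) ∧
    (∀ i, bisectLoop tails v lo hi ≤ i → i < tails.length → ¬ tails.getD i 0 < v) := by
  intro d
  induction d with
  | zero =>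
    intro lo hi hd hlh hhi hlo hhi2
    have heq : lo = hi := by omega
    rw [bisectLoop, dif_neg (by omega)]
    exact ⟨by omega, hlo, by rw [heq]; exact hhi2⟩
  | succ d ih =>
    intro lo hi hd hlh hhi hlo hhi2
    by_cases hcase : lo < hi
    · rw [bisectLoop, dif_pos hcase]
      have hmid1 : lo ≤ (lo + hi) / 2 := by omega
      have hmid2 : (lo + hi) / 2 < hi := by omega
      by_cases hm : tails.getD ((lo + hi) / 2) 0 < v
      · rw [if_pos hm]
        refine ih ((lo + hi) / 2 + 1) hi (by omega) (by omega) hhi ?_ hhi2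
        intro i hi2
        by_cases hil : i < lo
        · exact hlo i hil
        · exact lt_of_le_of_lt
            (sorted_getD_mono tails hs i ((lo + hi) / 2) (by omega) (by omega)) hm
      · rw [if_neg hm]
        refine ih lo ((lo + hi) / 2) (by omega) (by omega) (by omega) hlo ?_
        intro i hge hlen hiv
        exact hm (lt_of_le_of_lt (sorted_getD_mono tails hs ((lo + hi) / 2) i hge hlen) hiv)
    · rw [bisectLoop, dif_neg hcase]
      have heq : lo = hi := by omega
      exact ⟨by omega, hlo, by rw [heq]; exact hhi2⟩

theorem bisectLoop_spec (tails : List Int) (v : Int)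
    (hs : tails.Pairwise (· ≤ ·)) :
    ∀ (lo hi : Nat), lo ≤ hi → hi ≤ tails.length →
    (∀ i, i < lo → tails.getD i 0 < v) →
    (∀ i, hi ≤ i → i < tails.length → ¬ tails.getD i 0 < v) →
    bisectLoop tails v lo hi ≤ tails.length ∧
    (∀ i, i < bisectLoop tails v lo hi → tails.getD i 0 < v) ∧
    (∀ i, bisectLoop tails v lo hi ≤ i → i < tails.length → ¬ tails.getD i 0 < v) :=
  fun lo hi => bisectLoop_spec_aux tails v hs (hi - lo) lo hi le_rfl

-- position returned by B's binary search on the full array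
theorem bisect_pos_spec (tails : List Int) (v : Int) (hs : tails.Pairwise (· < ·)) :
    bisectLoop tails v 0 tails.length ≤ tails.length ∧
    (∀ i, i < bisectLoop tails v 0 tails.length → tails.getD i 0 < v) ∧
    (∀ i, bisectLoop tails v 0 tails.length ≤ i → i < tails.length → ¬ tails.getD i 0 < v) := by
  refine bisectLoop_spec tails v (hs.imp (fun h => le_of_lt h)) 0 tails.length (Nat.zero_le _) le_rfl ?_ ?_
  · intro i hi; omega
  · intro i h1 h2; omega

-- ----- the coupling invariant between A's dp values and B's tails array -----

def CoupleInv (pairs : List (Int × Int)) (tails : List Int) : Prop :=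
  tails.Pairwise (· < ·) ∧
  (tails.length : Int) = maxsnd pairs ∧
  (∀ j, j < tails.length → ∃ p ∈ pairs, p.2 = (j : Int) + 1 ∧ p.1 = tails.getD j 0) ∧
  (∀ p ∈ pairs, 1 ≤ p.2 ∧ p.2 ≤ (tails.length : Int) ∧ tails.getD (p.2 - 1).toNat 0 ≤ p.1)

theorem inv_nil : CoupleInv [] [] := by
  refine ⟨List.Pairwise.nil, rfl, ?_, ?_⟩
  · intro j hj; simp at hj
  · intro p hp; simp at hp

theorem sorted_getD_strict (tails : List Int) (hs : tails.Pairwise (· < ·)) (i j : Nat)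
    (hij : i < j) (hj : j < tails.length) : tails.getD i 0 < tails.getD j 0 := by
  rw [List.getD_eq_getElem _ _ (lt_trans hij hj), List.getD_eq_getElem _ _ hj]
  exact List.pairwise_iff_getElem.1 hs i j _ _ hij

theorem mem_selList (pairs : List (Int × Int)) (v : Int) (p : Int × Int)
    (hp : p ∈ pairs) (hlt : p.1 < v) : p.2 ∈ selList pairs v := by
  exact List.mem_filterMap.2 ⟨p, hp, by rw [if_pos hlt]⟩

theorem of_mem_selList (pairs : List (Int × Int)) (v x : Int)
    (hx : x ∈ selList pairs v) : ∃ p ∈ pairs, p.1 < v ∧ p.2 = x := by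
  rcases List.mem_filterMap.1 hx with ⟨p, hp, he⟩
  by_cases hc : p.1 < v
  · exact ⟨p, hp, hc, by rw [if_pos hc] at he; exact Option.some_injective _ he⟩
  · rw [if_neg hc] at he; cases he

theorem maxsnd_append (pairs : List (Int × Int)) (q : Int × Int) :
    maxsnd (pairs ++ [q]) = max (maxsnd pairs) q.2 := by
  simp [maxsnd, List.foldl_append]

theorem inv_step (pairs : List (Int × Int)) (tails : List Int) (v : Int) (h : CoupleInv pairs tails) :
    CoupleInv (dpsStep pairs v) (tailsStep tails v) := by
  obtain ⟨hsort, hlen, hP1, hP2⟩ := h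
  have hsle : tails.Pairwise (· ≤ ·) := hsort.imp (fun h => le_of_lt h)
  obtain ⟨hple, hbelow, habove⟩ := bisect_pos_spec tails v hsort
  set len := tails.length with hlendef
  set pos := bisectLoop tails v 0 len with hposdef
  set m := selMax pairs v with hmdef
  have hm0 : (0 : Int) ≤ m := (PySem.List.le_foldl_max (selList pairs v) 0).1
  have hms : m = (selList pairs v).foldl max 0 := rfl
  -- pos = m
  have hpm : (pos : Int) = m := by
    have hle1 : (pos : Int) ≤ m := by
      rcases Nat.eq_zero_or_pos pos with h0 | h0
      · omega
      · have hb : tails.getD (pos - 1) 0 < v := hbelow (pos - 1) (by omega)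
        rcases hP1 (pos - 1) (by omega) with ⟨p, hp, hp2, hp1⟩
        have hmem : p.2 ∈ selList pairs v := mem_selList pairs v p hp (by rw [hp1]; exact hb)
        have := (PySem.List.le_foldl_max (selList pairs v) 0).2 p.2 hmem
        have hpos : ((pos - 1 : Nat) : Int) = (pos : Int) - 1 := by omega
        rw [hp2, hpos, ← hms] at this
        omega
    have hle2 : m ≤ (pos : Int) := by
      rcases foldl_max_eq_or_mem (selList pairs v) 0 with h0 | hmem
      · rw [hms, h0]; omega
      · rcases of_mem_selList pairs v _ hmem with ⟨p, hp, hlt, hp2⟩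
        rcases hP2 p hp with ⟨h1p, h2p, h3p⟩
        by_contra hcon
        have hidx1 : pos ≤ (p.2 - 1).toNat := by omega
        have hidx2 : (p.2 - 1).toNat < len := by omega
        exact habove _ hidx1 hidx2 (lt_of_le_of_lt h3p hlt)
    omega
  -- the updated tails array, characterised uniformly
  have hstep : tailsStep tails v = if pos = len then tails ++ [v] else tails.set pos v := rfl
  set T := tailsStep tails v with hT
  have hlen' : T.length = if pos = len then len + 1 else len := by
    rw [hstep]; split <;> simp [hlendef]
  have hposlt : pos < T.length := by rw [hlen']; split <;> omega
  have hget : ∀ j, j < T.length → T.getD j 0 = if j = pos then v else tails.getD j 0 := by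
    intro j hj
    rw [hstep]
    by_cases hc : pos = len
    · rw [if_pos hc]
      by_cases hjp : j = pos
      · rw [if_pos hjp, hjp, hc, hlendef]
        rw [List.getD_eq_getElem _ _ (by simp)]
        simp
      · rw [if_neg hjp]
        have hjlen : j < len := by
          rw [hlen', if_pos hc] at hj; omega
        exact List.getD_append _ _ _ _ hjlen
    · rw [if_neg hc]
      have hjlen : j < len := by rw [hlen', if_neg hc] at hj; omega
      by_cases hjp : j = pos
      · rw [if_pos hjp, hjp, List.getD_eq_getElem _ _ (by simp; omega)]
        rw [List.getElem_set, if_pos rfl]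
      · rw [if_neg hjp, List.getD_eq_getElem _ _ (by simp; omega),
            List.getD_eq_getElem _ _ (by omega)]
        rw [List.getElem_set, if_neg (fun h => hjp h.symm)]
  have hjlen_of : ∀ j, j < T.length → j ≠ pos → j < len := by
    intro j hj hne
    rw [hlen'] at hj
    by_cases hc : pos = len
    · rw [if_pos hc] at hj; omega
    · rw [if_neg hc] at hj; omega
  have hvpos : ∀ j, pos < j → j < len → v < tails.getD j 0 := by
    intro j hpj hjl
    have h1 : ¬ tails.getD pos 0 < v := habove pos le_rfl (by omega)
    exact lt_of_le_of_lt (not_lt.1 h1) (sorted_getD_strict tails hsort pos j hpj hjl)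
  refine ⟨?_, ?_, ?_, ?_⟩
  -- sorted
  · rw [List.pairwise_iff_getElem]
    intro i j hi hj hij
    rw [← List.getD_eq_getElem _ 0 hi, ← List.getD_eq_getElem _ 0 hj, hget i hi, hget j hj]
    by_cases hip : i = pos
    · rw [if_pos hip, if_neg (by omega)]
      exact hvpos j (by omega) (hjlen_of j hj (by omega))
    · rw [if_neg hip]
      by_cases hjp : j = pos
      · rw [if_pos hjp]
        exact hbelow i (by omega)
      · rw [if_neg hjp]
        exact sorted_getD_strict tails hsort i j hij (hjlen_of j hj hjp)
  -- length = maxsnd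
  · rw [dpsStep, maxsnd_append, hlen', ← hmdef, ← hpm]
    split <;> simp <;> omega
  -- P1: every tails slot is witnessed
  · intro j hj
    by_cases hjp : j = pos
    · refine ⟨(v, 1 + m), by simp [dpsStep, hmdef], ?_, ?_⟩
      · simp [hjp, ← hpm]; omega
      · rw [hget j hj, if_pos hjp]
    · rcases hP1 j (hjlen_of j hj hjp) with ⟨p, hp, hp2, hp1⟩
      refine ⟨p, by simp [dpsStep]; exact Or.inl hp, hp2, ?_⟩
      rw [hget j hj, if_neg hjp]; exact hp1
  -- P2: minimality
  · intro p hp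
    rw [dpsStep, List.mem_append] at hp
    rcases hp with hp | hp
    · rcases hP2 p hp with ⟨h1p, h2p, h3p⟩
      have hTlen : len ≤ T.length := by rw [hlen']; split <;> omega
      refine ⟨h1p, by omega, ?_⟩
      have hidx : (p.2 - 1).toNat < len := by omega
      by_cases hip : (p.2 - 1).toNat = pos
      · have hpp : p.2 = (pos : Int) + 1 := by omega
        have hvp : v ≤ p.1 := by
          by_contra hcon
          have hmem := mem_selList pairs v p hp (by omega)
          have := (PySem.List.le_foldl_max (selList pairs v) 0).2 p.2 hmem
          rw [← hms] at this
          omega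
        rw [hget _ (by omega), if_pos hip]
        exact hvp
      · rw [hget _ (by omega), if_neg hip]
        exact h3p
    · have hpv : p = (v, 1 + m) := by simpa [dpsStep, hmdef] using hp
      subst hpv
      refine ⟨by simp; omega, ?_, ?_⟩
      · simp only
        rw [hlen']
        split <;> push_cast <;> omega
      · have : ((1 : Int) + m - 1).toNat = pos := by omega
        simp only [this]
        rw [hget pos hposlt, if_pos rfl]
  

theorem inv_pairsOf (l : List Int) : CoupleInv (pairsOf l) (tailsOf l) := by
  induction l using List.reverseRecOn with
  | nil => exact inv_nil
  | append_singleton l v ih =>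
    rw [pairsOf_append, tailsOf_append]; exact inv_step _ _ _ ih

-- ----- bridge: A's indexed dp array equals the pair model -----

theorem filterMap_range_getD {α β : Type} (l : List α) (g : α → Option β) (d : α) :
    (List.range l.length).filterMap (fun i => g (l.getD i d)) = l.filterMap g := by
  induction l using List.reverseRecOn with
  | nil => rfl
  | append_singleton l a ih =>
    rw [List.length_append, List.length_cons, List.length_nil, Nat.zero_add, List.range_succ,
        List.filterMap_append, List.filterMap_append]
    congr 1
    · rw [← ih]; apply List.filterMap_congr; intro i hi
      rw [List.getD_append _ _ _ _ (List.mem_range.1 hi)]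
    · have h : (l ++ [a]).getD l.length d = a := by
        rw [List.getD_eq_getElem _ _ (by simp)]
        simp
      simp only [List.filterMap_cons, List.filterMap_nil, List.getD] at h ⊢
      rw [h]

theorem solveStep_eq (nums : List Int) (pairs : List (Int × Int)) (k z : Nat)
    (hfst : pairs.map Prod.fst = nums.take k) (hk : k < nums.length)
    (hsnd : ∀ p ∈ pairs, 1 ≤ p.2) :
    solveStep nums ((pairs.map Prod.snd) ++ List.replicate (z + 1) 0) (k : Int)
      = (dpsStep pairs nums[k]).map Prod.snd ++ List.replicate z 0 := by
  have hplen : pairs.length = k := by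
    have := congrArg List.length hfst
    simpa [Nat.min_eq_left (le_of_lt hk)] using this
  rw [solveStep]
  have hvk : (PySem.List.pyGet? nums (k : Int)).getD 0 = nums[k] := by
    rw [PySem.List.pyGet?_natCast, List.getElem?_eq_getElem hk]; rfl
  -- the comprehension over range(x) is the filterMap over the pairs
  have hl : (PySem.List.pyRange 0 (k : Int) 1).filterMap (fun y =>
      if (PySem.List.pyGet? nums y).getD 0 < (PySem.List.pyGet? nums (k : Int)).getD 0
      then some ((PySem.List.pyGet? ((pairs.map Prod.snd) ++ List.replicate (z + 1) 0) y).getD 0)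
      else none) = selList pairs nums[k] := by
    rw [PySem.List.pyRange_zero, List.filterMap_map, Int.toNat_natCast]
    rw [show selList pairs nums[k] = (List.range pairs.length).filterMap
        (fun i => (fun p : Int × Int => if p.1 < nums[k] then some p.2 else none)
          (pairs.getD i (0, 0)))
      from (filterMap_range_getD pairs _ (0, 0)).symm, hplen]
    apply List.filterMap_congr
    intro i hi
    have hik : i < k := List.mem_range.1 hi
    have hip : i < pairs.length := by omega
    have hin : i < nums.length := by omega
    have h1 : (PySem.List.pyGet? nums ((fun k => (k : Int)) i)).getD 0 = nums[i] := by
      simp only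
      rw [PySem.List.pyGet?_natCast, List.getElem?_eq_getElem hin]; rfl
    have h2 : (PySem.List.pyGet? ((pairs.map Prod.snd) ++ List.replicate (z + 1) 0)
        ((fun k => (k : Int)) i)).getD 0 = pairs[i].2 := by
      simp only
      rw [PySem.List.pyGet?_natCast,
        List.getElem?_append_left (by simpa using hip),
        List.getElem?_map, List.getElem?_eq_getElem hip]
      rfl
    have h3 : pairs[i].1 = nums[i] := by
      have := congrArg (fun l => l[i]?) hfst
      simp only [List.getElem?_map, List.getElem?_take] at this
      rw [List.getElem?_eq_getElem hip, List.getElem?_eq_getElem hin] at this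
      simp [hik] at this
      exact this
    simp only [Function.comp]
    rw [h1, h2, hvk, List.getD_eq_getElem pairs (0,0) hip, h3]
  rw [hl]
  -- the written value is 1 + selMax
  have hval : (if (selList pairs nums[k]).isEmpty then (1 : Int)
      else (PySem.List.max? (selList pairs nums[k]) (fun y => y)).getD 0 + 1)
      = 1 + selMax pairs nums[k] := by
    rcases hsel : selList pairs nums[k] with _ | ⟨x, t⟩
    · simp [selMax, hsel]
    · have hx1 : (1 : Int) ≤ x := by
        have hxmem : x ∈ selList pairs nums[k] := by rw [hsel]; exact List.mem_cons_self
        rcases of_mem_selList pairs nums[k] x hxmem with ⟨p, hp, _, hp2⟩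
        rw [← hp2]; exact hsnd p hp
      rw [List.isEmpty_cons, if_neg (by simp), PySem.List.max?_id_cons, Option.getD_some,
        selMax, hsel, foldl_max_absorb x t (by omega), add_comm]
  rw [hval]
  -- writing at index k extends the model part by one entry
  have hkt : ((k : Int)).toNat = k := Int.toNat_natCast k
  rw [hkt, List.set_append, if_neg (by simp [hplen])]
  simp [dpsStep, hplen, List.replicate_succ]

def dp0list (N : Nat) : List Int := (List.replicate (N + 1) 0).set 0 1

theorem bridgeA (nums : List Int) (N : Nat) (hN : N ≤ nums.length) :
    ∀ k : Nat, 1 ≤ k → k ≤ N →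
    (PySem.List.pyRange 1 (k : Int) 1).foldl (solveStep nums) (dp0list N)
      = (pairsOf (nums.take k)).map Prod.snd ++ List.replicate (N + 1 - k) 0 := by
  intro k
  induction k with
  | zero => intro h; omega
  | succ k ih =>
    intro _ hkN
    by_cases hk0 : k = 0
    · subst hk0
      have h0 : 0 < nums.length := by omega
      rw [show ((1 : Nat) : Int) = 1 by rfl, PySem.List.pyRange_one_eq_nil (le_refl 1)]
      rw [List.foldl_nil, dp0list]
      have ht1 : nums.take 1 = [nums[0]] := by
        rw [List.take_add_one, List.take_zero, List.getElem?_eq_getElem h0]; rfl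
      rw [ht1]
      have : pairsOf [nums[0]] = [(nums[0], 1)] := by
        simp [pairsOf, dpsStep, selMax, selList]
      rw [this]
      simp [List.replicate_succ]
    · have hk1 : 1 ≤ k := by omega
      have hkn : k < nums.length := by omega
      have hcast : ((k + 1 : Nat) : Int) = (k : Int) + 1 := by omega
      rw [hcast, PySem.List.pyRange_one_succ_right (by exact_mod_cast hk1), List.foldl_append,
        ih hk1 (by omega), List.foldl_cons, List.foldl_nil]
      have hrep : N + 1 - k = (N - k) + 1 := by omega
      rw [hrep, solveStep_eq nums (pairsOf (nums.take k)) k (N - k)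
        (map_fst_pairsOf _) hkn (snd_pairsOf_pos _)]
      rw [List.take_add_one, List.getElem?_eq_getElem hkn]
      simp only [Option.toList_some]
      rw [pairsOf_append, show N + 1 - (k + 1) = N - k from by omega]

-- max over A's final dp array (model form ++ the untouched trailing 0)
theorem final_max (pairs : List (Int × Int)) (hne : pairs ≠ [])
    (hpos : ∀ p ∈ pairs, 1 ≤ p.2) :
    (PySem.List.max? ((pairs.map Prod.snd) ++ [0]) (fun y => y)).getD 0 = maxsnd pairs := by
  rcases pairs with _ | ⟨p, ps⟩
  · exact absurd rfl hne
  have hp1 : (1 : Int) ≤ p.2 := hpos p List.mem_cons_self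
  rw [List.map_cons, List.cons_append, PySem.List.max?_id_cons, Option.getD_some,
    List.foldl_append, List.foldl_cons, List.foldl_nil]
  have hge : p.2 ≤ (ps.map Prod.snd).foldl max p.2 :=
    (PySem.List.le_foldl_max (ps.map Prod.snd) p.2).1
  rw [maxsnd, List.map_cons, foldl_max_absorb p.2 (ps.map Prod.snd) (by omega)]
  omega

-- ----- main equivalence on Pre_ outside D_ -----

theorem solve_eq_solve_alt (n : Int) (nums : List Int) (h1 : 1 ≤ n)
    (h2 : n ≤ (nums.length : Int)) : solve n nums = solve_alt n nums := by
  obtain ⟨N, hN⟩ : ∃ N : Nat, (N : Int) = n := ⟨n.toNat, Int.toNat_of_nonneg (by omega)⟩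
  have hN1 : 1 ≤ N := by omega
  have hNlen : N ≤ nums.length := by omega
  have hAside : solve n nums = n - maxsnd (pairsOf (nums.take N)) := by
    rw [solve]
    have hdp0 : (List.replicate (n + 1).toNat 0).set 0 (1 : Int) = dp0list N := by
      rw [dp0list]; congr 2; omega
    rw [hdp0, ← hN, bridgeA nums N hNlen N hN1 le_rfl]
    rw [show N + 1 - N = 1 by omega, List.replicate_one]
    rw [final_max _ ?_ (snd_pairsOf_pos _)]
    · intro hcon
      have := congrArg List.length hcon
      rw [length_pairsOf, List.length_take] at this
      simp only [List.length_nil] at this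
      omega
  have hBside : solve_alt n nums = n - maxsnd (pairsOf (nums.take N)) := by
    rw [solve_alt]
    rw [PySem.List.slice_to nums (by omega : (0:Int) ≤ n),
      show n.toNat = N by omega]
    have hinv := inv_pairsOf (nums.take N)
    rw [show (nums.take N).foldl tailsStep [] = tailsOf (nums.take N) from rfl]
    rw [hinv.2.1]
  rw [hAside, hBside]

-- ===== VERDICT (by name: the statement is the Claim_ definition above) =====
theorem solve_spec : Claim_unchanged_solve := by
  intro n nums _ hpre hnd
  have h1 : 1 ≤ n := by
    rcases hpre with ⟨h0, _⟩
    have : n ≠ 0 := hnd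
    omega
  exact solve_eq_solve_alt n nums h1 hpre.2

theorem solve_changed : Claim_changed_solve := by unfold Claim_changed_solve; decide

theorem solve_tight : Claim_exact_solve := by
  intro n nums _ _ hD
  subst hD
  simp [solve, solve_alt, PySem.List.pyRange_one_eq_nil (by norm_num : (0:Int) ≤ 1),
    PySem.List.slice_to _ (le_refl (0:Int)), PySem.List.max?]
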